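-- pv_equiv track=rewrite | github.com/CL-75/CS362-Group22 | task.py | get_date_from_epoch
-- ===== SOURCE A (Python) =====
-- def get_date_from_epoch(years, days):
--     """
--     Input: A number of years and number of days
--
--     Output: The specific date from the epoch (1/1/1970)
--     based on input years and days.
--     (i.e. an input of 10 years, 50 days will return the specific date
--     of 10 years and 50 days from 1/1/1970)
--     """
--     cur_day = 1
--     cur_month = 1
--     # Epoch year + years
--     cur_year = 1970 + years
--
--     # Making lists for days in each month for leap years and regular years
--     leapyear_days = [31, 29, 31, 30, 31, 30, 31, 31, 30, 31, 30, 31]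
--     month_days = [31, 28, 31, 30, 31, 30, 31, 31, 30, 31, 30, 31]
--
--     while days:
--         cal = month_days
-- # https://en.wikipedia.org/wiki/Leap_year
-- # If a year is exactly divisible by 4, it is a leap year
-- # It is also a leap year if it exactly divisible by exactly 100 and 400 as well
--         if cur_year % 4 == 0:
--             cal = leapyear_days
--
--         elif cur_year % 400 == 0:
--             cal = month_days
--
--         elif cur_year % 100 == 0:
--             cal = leapyear_days
--
--         if cur_day == cal[cur_month-1]:
--             cur_month += 1
--             # Signals end of the year
--             if cur_month == 13:
--                 cur_month = 1
--                 cur_year += 1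
--
--             cur_day = 0
--
--         cur_day += 1
--
--         days -= 1
--
--     return cur_month, cur_day, cur_year
-- ===== SOURCE B (Python) =====
-- def get_date_from_epoch(years, days):
--     # O(1) arithmetic over A's effective calendar (leap year exactly when year % 4 == 0,
--     # since A's %400/%100 branches are unreachable: any multiple of 100 is a multiple of 4),
--     # using the 4-year cycle of 1461 days instead of stepping day by day.
--     y = 1970 + years
--     r = y % 4
--     # days from Jan 1 of the cycle-start year (y - r, divisible by 4) to Jan 1 of year y
--     t = days + 365 * r + (1 if r else 0)
--     q, s = divmod(t, 1461)
--     base = y - r + 4 * q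
--     if s < 366:
--         year = base
--         doy = s
--         lengths = [31, 29, 31, 30, 31, 30, 31, 31, 30, 31, 30, 31]
--     else:
--         k, doy = divmod(s - 366, 365)
--         year = base + 1 + k
--         lengths = [31, 28, 31, 30, 31, 30, 31, 31, 30, 31, 30, 31]
--     month = 1
--     for ml in lengths:
--         if doy < ml:
--             break
--         doy -= ml
--         month += 1
--     return month, doy + 1, year
-- ===== Notes on version B (the rewrite author's own statement) =====
-- stated objective: faster
-- what changed: Replaces A's day-by-day while loop with direct arithmetic: a divmod over the 1461-day 4-year cycle of A's effective leap rule (leap exactly when year % 4 == 0; A's %400/%100 branches are unreachable since every multiple of 100 is a multiple of 4) plus a single 12-entry month scan.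
import Mathlib
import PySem

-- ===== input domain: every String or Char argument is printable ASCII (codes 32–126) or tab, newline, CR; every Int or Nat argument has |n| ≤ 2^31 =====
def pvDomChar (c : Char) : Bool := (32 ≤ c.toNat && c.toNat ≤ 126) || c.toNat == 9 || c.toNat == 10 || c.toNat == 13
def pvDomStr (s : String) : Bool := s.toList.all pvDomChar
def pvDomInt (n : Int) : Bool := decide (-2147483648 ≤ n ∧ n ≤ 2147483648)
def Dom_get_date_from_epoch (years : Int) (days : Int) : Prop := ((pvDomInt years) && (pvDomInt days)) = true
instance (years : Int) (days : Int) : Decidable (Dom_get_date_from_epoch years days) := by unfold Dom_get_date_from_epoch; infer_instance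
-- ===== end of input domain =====

-- B replaces A's O(days) day-by-day stepping with O(1) arithmetic on the 1461-day 4-year
-- cycle of A's effective calendar (leap exactly when year % 4 == 0) plus a 12-entry month scan.

-- ===== PORT A =====
def aLeap : List Int := [31, 29, 31, 30, 31, 30, 31, 31, 30, 31, 30, 31]
def aReg  : List Int := [31, 28, 31, 30, 31, 30, 31, 31, 30, 31, 30, 31]

-- one iteration of A's while body; state = (cur_day, cur_month, cur_year)
def aStep : Int × Int × Int → Int × Int × Int
  | (d, m, y) =>
    let cal := if PySem.Int.mod y 4 = 0 then aLeap
      else if PySem.Int.mod y 400 = 0 then aReg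
      else if PySem.Int.mod y 100 = 0 then aLeap
      else aReg
    -- cur_month is always in 1..12 here, so cal[cur_month-1] never raises; getD 0 is unreachable
    if d = (PySem.List.pyGet? cal (m - 1)).getD 0 then
      if m + 1 = 13 then (1, 1, y + 1) else (1, m + 1, y)
    else (d + 1, m, y)

-- 'while days: … days -= 1' run days times (Pre_ restricts to days ≥ 0, where this is exact)
def aLoop : Nat → Int × Int × Int → Int × Int × Int
  | 0, st => st
  | n + 1, st => aLoop n (aStep st)

def get_date_from_epoch (years : Int) (days : Int) : List Int :=
  match aLoop days.toNat (1, 1, 1970 + years) with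
  | (d, m, y) => [m, d, y]

-- ===== PORT B =====
def bLeap : List Int := [31, 29, 31, 30, 31, 30, 31, 31, 30, 31, 30, 31]
def bReg  : List Int := [31, 28, 31, 30, 31, 30, 31, 31, 30, 31, 30, 31]

-- 'for ml in lengths: if doy < ml: break; doy -= ml; month += 1'
def bMonthLoop : List Int → Int → Int → Int × Int
  | [], m, doy => (m, doy)
  | ml :: rest, m, doy => if doy < ml then (m, doy) else bMonthLoop rest (m + 1) (doy - ml)

def get_date_from_epoch_alt (years : Int) (days : Int) : List Int :=
  let y := 1970 + years
  let r := PySem.Int.mod y 4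
  let t := days + 365 * r + (if r ≠ 0 then 1 else 0)
  let q := PySem.Int.floordiv t 1461
  let s := PySem.Int.mod t 1461
  let base := y - r + 4 * q
  if s < 366 then
    match bMonthLoop bLeap 1 s with
    | (m, doy) => [m, doy + 1, base]
  else
    let k := PySem.Int.floordiv (s - 366) 365
    let doy0 := PySem.Int.mod (s - 366) 365
    match bMonthLoop bReg 1 doy0 with
    | (m, doy) => [m, doy + 1, base + 1 + k]

-- ===== PRECONDITION & SPEC =====
-- Pre_ excludes days < 0, where Python's 'while days: … days -= 1' never terminates (A diverges).
def Pre_get_date_from_epoch (years : Int) (days : Int) : Prop := 0 ≤ days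
instance (years : Int) (days : Int) : Decidable (Pre_get_date_from_epoch years days) := by unfold Pre_get_date_from_epoch; infer_instance
def pvWitness_get_date_from_epoch : Int × Int := (10, 50)

def Spec_get_date_from_epoch (years : Int) (days : Int) (out : List Int) : Prop := out = get_date_from_epoch_alt years days
instance (years : Int) (days : Int) (out : List Int) : Decidable (Spec_get_date_from_epoch years days out) := by unfold Spec_get_date_from_epoch; infer_instance

-- ===== CLAIM (what is proved, stated in full; the proofs are below) =====
def Claim_equal_get_date_from_epoch : Prop := ∀ (years : Int) (days : Int), Dom_get_date_from_epoch years days → Pre_get_date_from_epoch years days → Spec_get_date_from_epoch years days (get_date_from_epoch years days)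

-- ===== LEMMAS AND PROOFS =====

-- day (d, m, yoff) reached after s steps from Jan 1 of a year divisible by 4 (0 ≤ s < 1461)
def cyc (s : Nat) : Int × Int × Int :=
  if s < 366 then
    match bMonthLoop bLeap 1 (s : Int) with
    | (m, doy) => (doy + 1, m, 0)
  else
    let u := s - 366
    match bMonthLoop bReg 1 ((u % 365 : Nat) : Int) with
    | (m, doy) => (doy + 1, m, 1 + ((u / 365 : Nat) : Int))

def pre4 (r : Nat) : Nat := 365 * r + (if r = 0 then 0 else 1)

def model (y0 : Int) (n : Nat) : Int × Int × Int :=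
  let r := (PySem.Int.mod y0 4).toNat
  let t := n + pre4 r
  match cyc (t % 1461) with
  | (d, m, j) => (d, m, y0 - r + 4 * ((t / 1461 : Nat) : Int) + j)

set_option maxRecDepth 40000 in
lemma cyc_j_bound : ∀ s < 1461, 0 ≤ (cyc s).2.2 ∧ (cyc s).2.2 < 4 := by decide

set_option maxRecDepth 40000 in
lemma cyc_step : ∀ s < 1461, aStep (cyc s) = (if s = 1460 then (1, 1, 4) else cyc (s + 1)) := by decide

lemma aStep_shift (b d m j : Int) (hb : b % 4 = 0) (h0 : 0 ≤ j) (h4 : j < 4) :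
    aStep (d, m, b + j) = ((aStep (d, m, j)).1, (aStep (d, m, j)).2.1, b + (aStep (d, m, j)).2.2) := by
  have em : ∀ (a k : Int), 0 < k → PySem.Int.mod a k = a % k := fun a k hk => PySem.Int.mod_eq_emod_of_pos hk
  simp only [aStep, em _ _ (by norm_num : (0:Int) < 4), em _ _ (by norm_num : (0:Int) < 400),
    em _ _ (by norm_num : (0:Int) < 100)]
  have h4' : (b + j) % 4 = j := by omega
  have hj4 : j % 4 = j := by omega
  have hj400 : j % 400 = j := by omega
  have hj100 : j % 100 = j := by omega
  rw [h4', hj4, hj400, hj100]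
  by_cases hj : j = 0
  · subst hj
    split_ifs <;> first | omega | simp
  · have h400 : ¬ (b + j) % 400 = 0 := by omega
    have h100 : ¬ (b + j) % 100 = 0 := by omega
    simp only [if_neg hj, if_neg h400, if_neg h100]
    split_ifs <;> first | omega | (simp <;> omega)

lemma aLoop_succ : ∀ (n : Nat) (st : Int × Int × Int), aLoop (n + 1) st = aStep (aLoop n st) := by
  intro n
  induction n with
  | zero => intro st; rfl
  | succ k ih => intro st; exact ih (aStep st)

lemma model_zero (y0 : Int) : model y0 0 = (1, 1, y0) := by
  have h0 : 0 ≤ PySem.Int.mod y0 4 := PySem.Int.mod_nonneg _ (by norm_num)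
  have h4 : PySem.Int.mod y0 4 < 4 := PySem.Int.mod_lt _ (by norm_num)
  have hcast : ((PySem.Int.mod y0 4).toNat : Int) = PySem.Int.mod y0 4 := Int.toNat_of_nonneg h0
  have hr : (PySem.Int.mod y0 4).toNat = 0 ∨ (PySem.Int.mod y0 4).toNat = 1 ∨
      (PySem.Int.mod y0 4).toNat = 2 ∨ (PySem.Int.mod y0 4).toNat = 3 := by omega
  rcases hr with h | h | h | h
  · rw [model, h]; norm_num [pre4]
    rw [show cyc 0 = (1, 1, 0) from by decide]; norm_num
  · rw [model, h]; norm_num [pre4]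
    rw [show cyc 366 = (1, 1, 1) from by decide]; norm_num
  · rw [model, h]; norm_num [pre4]
    rw [show cyc 731 = (1, 1, 2) from by decide]; norm_num
  · rw [model, h]; norm_num [pre4]
    rw [show cyc 1096 = (1, 1, 3) from by decide]; norm_num

lemma model_succ (y0 : Int) (n : Nat) : model y0 (n + 1) = aStep (model y0 n) := by
  have h0 : 0 ≤ PySem.Int.mod y0 4 := PySem.Int.mod_nonneg _ (by norm_num)
  have hcast : ((PySem.Int.mod y0 4).toNat : Int) = PySem.Int.mod y0 4 := Int.toNat_of_nonneg h0
  have hmod : PySem.Int.mod y0 4 = y0 % 4 := PySem.Int.mod_eq_emod_of_pos (by norm_num)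
  rw [model, model]
  set r := (PySem.Int.mod y0 4).toNat with hrdef
  set t := n + pre4 r with htdef
  have ht1 : n + 1 + pre4 r = t + 1 := by omega
  rw [ht1]
  have hs : t % 1461 < 1461 := Nat.mod_lt _ (by norm_num)
  rcases hcyc : cyc (t % 1461) with ⟨d, m, j⟩
  have hjb := cyc_j_bound (t % 1461) hs
  rw [hcyc] at hjb
  have hb4 : (y0 - ↑r + 4 * ((t / 1461 : Nat) : Int)) % 4 = 0 := by omega
  have hshift := aStep_shift (y0 - ↑r + 4 * ((t / 1461 : Nat) : Int)) d m j hb4 hjb.1 hjb.2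
  have hstep := cyc_step (t % 1461) hs
  rw [hcyc] at hstep
  by_cases hlast : t % 1461 = 1460
  · rw [if_pos hlast] at hstep
    have h1 : (t + 1) % 1461 = 0 := by omega
    have h2 : ((t + 1) / 1461 : Nat) = t / 1461 + 1 := by omega
    rw [h1, h2, show cyc 0 = (1, 1, 0) from by decide]
    have : aStep (d, m, y0 - ↑r + 4 * ((t / 1461 : Nat) : Int) + j) = (1, 1, y0 - ↑r + 4 * ((t / 1461 : Nat) : Int) + 4) := by
      rw [hshift, hstep]
    rw [this]
    refine Prod.ext rfl (Prod.ext rfl ?_)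
    push_cast
    ring
  · rw [if_neg hlast] at hstep
    have h1 : (t + 1) % 1461 = t % 1461 + 1 := by omega
    have h2 : ((t + 1) / 1461 : Nat) = t / 1461 := by omega
    rw [h1, h2]
    rcases hcyc2 : cyc (t % 1461 + 1) with ⟨d2, m2, j2⟩
    rw [hcyc2] at hstep
    rw [hshift, hstep]

lemma aLoop_model (y0 : Int) : ∀ n : Nat, aLoop n (1, 1, y0) = model y0 n := by
  intro n
  induction n with
  | zero => rw [model_zero]; rfl
  | succ k ih => rw [aLoop_succ, ih, model_succ]

set_option maxRecDepth 10000 in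
lemma alt_model (years days : Int) (hd : 0 ≤ days) :
    get_date_from_epoch_alt years days =
      match model (1970 + years) days.toNat with
      | (d, m, y) => [m, d, y] := by
  have h0 : 0 ≤ PySem.Int.mod (1970 + years) 4 := PySem.Int.mod_nonneg _ (by norm_num)
  simp only [get_date_from_epoch_alt, model]
  set rI := PySem.Int.mod (1970 + years) 4 with hrIdef
  have hcast : ((rI.toNat : Int)) = rI := Int.toNat_of_nonneg h0
  set tN := days.toNat + pre4 rI.toNat with htNdef
  have htI : days + 365 * rI + (if rI ≠ 0 then 1 else 0) = (tN : Int) := by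
    rw [htNdef, pre4]
    by_cases hz : rI = 0
    · have hz' : rI.toNat = 0 := by omega
      simp only [hz, if_neg (by simp : ¬ (0:Int) ≠ 0)]
      push_cast
      omega
    · have hz' : ¬ rI.toNat = 0 := by omega
      simp only [if_pos hz, if_neg hz']
      push_cast
      omega
  rw [htI]
  have hq : PySem.Int.floordiv (tN : Int) 1461 = ((tN / 1461 : Nat) : Int) := by
    rw [PySem.Int.floordiv_eq_ediv_of_pos (by norm_num)]; omega
  have hs : PySem.Int.mod (tN : Int) 1461 = ((tN % 1461 : Nat) : Int) := by
    rw [PySem.Int.mod_eq_emod_of_pos (by norm_num)]; omega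
  rw [hq, hs, cyc]
  by_cases hlt : tN % 1461 < 366
  · rw [if_pos (show ((tN % 1461 : Nat) : Int) < 366 by omega), if_pos hlt]
    rcases hbm : bMonthLoop bLeap 1 ((tN % 1461 : Nat) : Int) with ⟨m, doy⟩
    simp [hcast]
  · rw [if_neg (show ¬ ((tN % 1461 : Nat) : Int) < 366 by omega), if_neg hlt]
    have e1 : ((tN % 1461 : Nat) : Int) - 366 = ((tN % 1461 - 366 : Nat) : Int) := by omega
    rw [e1]
    have hk : PySem.Int.floordiv ((tN % 1461 - 366 : Nat) : Int) 365 = (((tN % 1461 - 366) / 365 : Nat) : Int) := by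
      rw [PySem.Int.floordiv_eq_ediv_of_pos (by norm_num)]; omega
    have hm2 : PySem.Int.mod ((tN % 1461 - 366 : Nat) : Int) 365 = (((tN % 1461 - 366) % 365 : Nat) : Int) := by
      rw [PySem.Int.mod_eq_emod_of_pos (by norm_num)]; omega
    rw [hk, hm2]
    rcases hbm : bMonthLoop bReg 1 (((tN % 1461 - 366) % 365 : Nat) : Int) with ⟨m, doy⟩
    have hbm' : bMonthLoop bReg 1 ((((tN % 1461 - 366) : Nat) : Int) % 365) = (m, doy) := by
      rw [show ((((tN % 1461 - 366) : Nat) : Int) % 365) = (((tN % 1461 - 366) % 365 : Nat) : Int) by omega]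
      exact hbm
    simp [hcast, hbm']
    omega

-- ===== VERDICT (by name: the statement is the Claim_ definition above) =====
theorem get_date_from_epoch_spec : Claim_equal_get_date_from_epoch := by
  intro years days _ hpre
  unfold Spec_get_date_from_epoch get_date_from_epoch
  rw [aLoop_model, alt_model years days hpre]
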